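-- pv_equiv track=rewrite | github.com/expectedparrot/edsl | edsl/embeddings/embeddings_visualization.py | _colors_for_clusters
-- ===== SOURCE A (Python) =====
-- from typing import List, Tuple, Optional, Any
--
-- def _colors_for_clusters(ids: List[str], doc_to_cluster: dict) -> dict:
--     palette = [
--         "#1f77b4",
--         "#ff7f0e",
--         "#2ca02c",
--         "#d62728",
--         "#9467bd",
--         "#8c564b",
--         "#e377c2",
--         "#7f7f7f",
--         "#bcbd22",
--         "#17becf",
--     ]
--     cluster_to_color: dict = {}
--     colors: dict = {}
--     for doc_id in ids:
--         if doc_id not in doc_to_cluster: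
--             continue
--         cid = int(doc_to_cluster[doc_id])
--         if cid not in cluster_to_color:
--             cluster_to_color[cid] = palette[len(cluster_to_color) % len(palette)]
--         colors[doc_id] = cluster_to_color[cid]
--     return colors
-- ===== SOURCE B (Python) =====
-- def _colors_for_clusters(ids, doc_to_cluster):
--     palette = [
--         "#1f77b4",
--         "#ff7f0e",
--         "#2ca02c",
--         "#d62728",
--         "#9467bd",
--         "#8c564b",
--         "#e377c2",
--         "#7f7f7f",
--         "#bcbd22",
--         "#17becf",
--     ]
--     # (position, doc, cluster) triples for the docs that have a cluster
--     pairs = [(i, d, int(doc_to_cluster[d])) for i, d in enumerate(ids) if d in doc_to_cluster]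
--     # earliest position of each cluster id: walk backwards so the earliest write wins
--     first = {}
--     for i, _, c in reversed(pairs):
--         first[c] = i
--     # rank clusters by their earliest position; color = palette at that rank
--     ranked = sorted(first, key=lambda c: first[c])
--     cluster_to_color = {c: palette[r % len(palette)] for r, c in enumerate(ranked)}
--     return {d: cluster_to_color[c] for _, d, c in pairs}
-- ===== Notes on version B (the rewrite author's own statement) =====
-- stated objective: alternative
-- what changed: Instead of growing a cluster-to-color dict while scanning (A), B records each cluster's earliest position via a reversed overwrite pass and then SORTS the distinct cluster ids by that position to obtain the palette ranks, before a final coloring pass.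
import Mathlib
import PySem

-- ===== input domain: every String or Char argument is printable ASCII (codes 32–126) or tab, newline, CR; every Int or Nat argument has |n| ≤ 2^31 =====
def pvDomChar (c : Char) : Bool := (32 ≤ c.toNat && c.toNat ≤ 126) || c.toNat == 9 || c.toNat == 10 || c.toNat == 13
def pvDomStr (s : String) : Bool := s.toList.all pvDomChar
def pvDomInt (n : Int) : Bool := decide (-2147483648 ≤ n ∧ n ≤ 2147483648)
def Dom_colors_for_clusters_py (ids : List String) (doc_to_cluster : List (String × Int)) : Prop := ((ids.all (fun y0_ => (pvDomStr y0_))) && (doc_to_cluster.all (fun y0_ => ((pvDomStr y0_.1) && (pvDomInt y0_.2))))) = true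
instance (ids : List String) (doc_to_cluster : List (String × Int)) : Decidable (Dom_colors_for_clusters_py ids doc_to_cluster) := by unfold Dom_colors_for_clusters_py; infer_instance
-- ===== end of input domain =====

-- B replaces A's interleaved scan (growing the cluster→color dict while emitting output) by a
-- different algorithm: record each cluster's earliest position with a reversed overwrite pass,
-- SORT the distinct cluster ids by that position to get the palette ranks, then color in a
-- final pass; objective: alternative, same behaviour.

-- shared constant: the literal palette from the Python source
def pvPalette : List String :=
  ["#1f77b4", "#ff7f0e", "#2ca02c", "#d62728", "#9467bd",
   "#8c564b", "#e377c2", "#7f7f7f", "#bcbd22", "#17becf"]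

-- ===== PORT A =====
-- literal transliteration of A: one loop over ids, growing cluster_to_color and colors together.
-- (`int(doc_to_cluster[doc_id])` is the identity on the int values of the dict.)
def colors_for_clusters_py (ids : List String) (doc_to_cluster : List (String × Int)) : List (String × String) :=
  let m := PySem.Dict.mk doc_to_cluster
  let st := ids.foldl
    (fun (st : PySem.Dict Int String × PySem.Dict String String) doc_id =>
      if m.contains doc_id = false then st
      else
        let cid : Int := m.getD doc_id 0
        let ctc := if st.1.contains cid then st.1
                   else st.1.insert cid (pvPalette.getD (st.1.size % pvPalette.length) "")
        (ctc, st.2.insert doc_id (ctc.getD cid "")))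
    (PySem.Dict.empty, PySem.Dict.empty)
  st.2.items

-- ===== PORT B =====
-- literal transliteration of Source B: pairs (comprehension = filter+map over enumerate),
-- `first` built by the reversed overwrite loop, `ranked = sorted(first, key=…)`
-- (dict iteration = keys), then the two comprehensions as folds.
def colors_for_clusters_py_alt (ids : List String) (doc_to_cluster : List (String × Int)) : List (String × String) :=
  let m := PySem.Dict.mk doc_to_cluster
  let pairs : List (Int × String × Int) :=
    ((PySem.List.enumerate ids).filter (fun p => m.contains p.2)).map
      (fun p => (p.1, p.2, m.getD p.2 0))
  let first : PySem.Dict Int Int :=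
    pairs.reverse.foldl (fun d p => d.insert p.2.2 p.1) PySem.Dict.empty
  let ranked : List Int := PySem.List.sorted first.keys (fun c => first.getD c 0) false
  let cluster_to_color : PySem.Dict Int String :=
    (PySem.List.enumerate ranked).foldl
      (fun t p => t.insert p.2 (pvPalette.getD (p.1.toNat % pvPalette.length) "")) PySem.Dict.empty
  (pairs.foldl
    (fun (colors : PySem.Dict String String) p =>
      colors.insert p.2.1 (cluster_to_color.getD p.2.2 "")) PySem.Dict.empty).items

-- ===== PRECONDITION & SPEC =====
def Spec_colors_for_clusters_py (ids : List String) (doc_to_cluster : List (String × Int)) (out : List (String × String)) : Prop := out = colors_for_clusters_py_alt ids doc_to_cluster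
instance (ids : List String) (doc_to_cluster : List (String × Int)) (out : List (String × String)) : Decidable (Spec_colors_for_clusters_py ids doc_to_cluster out) := by unfold Spec_colors_for_clusters_py; infer_instance

-- ===== CLAIM (what is proved, stated in full; the proofs are below) =====
def Claim_equal_colors_for_clusters_py : Prop := ∀ (ids : List String) (doc_to_cluster : List (String × Int)), Dom_colors_for_clusters_py ids doc_to_cluster → Spec_colors_for_clusters_py ids doc_to_cluster (colors_for_clusters_py ids doc_to_cluster)

-- ===== LEMMAS AND PROOFS =====

-- proof-only helpers: named versions of the two ports' loop ingredients
def pvPal (n : Nat) : String := pvPalette.getD (n % pvPalette.length) ""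

def pvCids (m : PySem.Dict String Int) (l : List String) : List Int :=
  PySem.List.dedup ((l.filter (fun d => m.contains d)).map (fun d => m.getD d 0))

def pvCtc (cl : List Int) : PySem.Dict Int String :=
  (PySem.List.enumerate cl).foldl (fun t p => t.insert p.2 (pvPal p.1.toNat)) PySem.Dict.empty

def pvStepA (m : PySem.Dict String Int) (st : PySem.Dict Int String × PySem.Dict String String) (doc_id : String) : PySem.Dict Int String × PySem.Dict String String :=
  if m.contains doc_id = false then st
  else
    let cid : Int := m.getD doc_id 0
    let ctc := if st.1.contains cid then st.1
               else st.1.insert cid (pvPalette.getD (st.1.size % pvPalette.length) "")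
    (ctc, st.2.insert doc_id (ctc.getD cid ""))

-- B-side helpers (proof only): the "pairs" list and the first-occurrence index
def pvPairs (m : PySem.Dict String Int) (ids : List String) : List (Int × String × Int) :=
  ((PySem.List.enumerate ids).filter (fun p => m.contains p.2)).map
    (fun p => (p.1, p.2, m.getD p.2 0))

def pvFirstIdx (l : List (Int × String × Int)) (c : Int) : Int :=
  match l.find? (fun p => p.2.2 == c) with
  | some p => p.1
  | none => 0

theorem pv_enum_append {α : Type} (l : List α) (x : α) (s : Int) :
    PySem.List.enumerate (l ++ [x]) s = PySem.List.enumerate l s ++ [((s + l.length : Int), x)] := by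
  induction l generalizing s with
  | nil => simp [PySem.List.enumerate_cons, PySem.List.enumerate_nil]
  | cons a l ih =>
      simp [PySem.List.enumerate_cons, ih]
      ring_nf

theorem pvCtc_append (cl : List Int) (c : Int) :
    pvCtc (cl ++ [c]) = (pvCtc cl).insert c (pvPal cl.length) := by
  simp [pvCtc, pv_enum_append, List.foldl_append]

theorem pvCtc_keys (cl : List Int) : (pvCtc cl).keys = PySem.List.dedup cl := by
  unfold pvCtc
  rw [PySem.Dict.keys_foldl_insert_key (PySem.List.enumerate cl) (fun p => p.2) (fun t p => pvPal p.1.toNat)]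
  simp [PySem.List.map_snd_enumerate, PySem.Set.update, PySem.Set.ofList, PySem.List.dedup,
        PySem.Dict.keys_empty, PySem.Set.empty]

theorem pvCtc_contains (cl : List Int) (c : Int) : (pvCtc cl).contains c = true ↔ c ∈ cl := by
  rw [PySem.Dict.contains_iff_mem_keys, pvCtc_keys, PySem.List.mem_dedup]

theorem pvCtc_size (cl : List Int) (h : cl.Nodup) : (pvCtc cl).size = cl.length := by
  induction cl using List.reverseRecOn with
  | nil => rfl
  | append_singleton cl c ih =>
      have hc : c ∉ cl := by
        intro hmem
        exact (List.disjoint_of_nodup_append h) hmem (by simp)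
      have hcont : (pvCtc cl).contains c = false := by
        rw [Bool.eq_false_iff]
        intro hcc
        exact hc ((pvCtc_contains cl c).mp hcc)
      rw [pvCtc_append, PySem.Dict.size_insert, hcont]
      simp [ih (h.sublist (List.sublist_append_left _ _))]

theorem pvCtc_getD_prefix (cl t : List Int) (c : Int) (hnd : (cl ++ t).Nodup) (hc : c ∈ cl) :
    (pvCtc (cl ++ t)).getD c "" = (pvCtc cl).getD c "" := by
  induction t using List.reverseRecOn with
  | nil => simp
  | append_singleton ts x ih =>
      have hx : x ∉ cl ++ ts := by
        intro hmem
        rw [← List.append_assoc] at hnd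
        exact (List.disjoint_of_nodup_append hnd) hmem (by simp)
      rw [← List.append_assoc, pvCtc_append, PySem.Dict.getD_insert_of_ne]
      · exact ih (by rw [← List.append_assoc] at hnd; exact hnd.sublist (List.sublist_append_left _ _))
      · intro hcx
        exact hx (hcx ▸ List.mem_append_left ts hc)

theorem pvCids_append_not (m : PySem.Dict String Int) (p : List String) (d : String)
    (h : m.contains d = false) : pvCids m (p ++ [d]) = pvCids m p := by
  simp [pvCids, List.filter_append, h]

theorem pvCids_append_mem (m : PySem.Dict String Int) (p : List String) (d : String)
    (h : m.contains d = true) (h2 : m.getD d 0 ∈ pvCids m p) :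
    pvCids m (p ++ [d]) = pvCids m p := by
  have h2' : m.getD d 0 ∈ PySem.List.dedup ((p.filter (fun d => m.contains d)).map (fun d => m.getD d 0)) := h2
  simp [pvCids, List.filter_append, h, PySem.List.dedup, PySem.Set.ofList, List.foldl_append] at *
  simp [PySem.Set.add, h2']

theorem pvCids_append_new (m : PySem.Dict String Int) (p : List String) (d : String)
    (h : m.contains d = true) (h2 : m.getD d 0 ∉ pvCids m p) :
    pvCids m (p ++ [d]) = pvCids m p ++ [m.getD d 0] := by
  have h2' : m.getD d 0 ∉ PySem.List.dedup ((p.filter (fun d => m.contains d)).map (fun d => m.getD d 0)) := h2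
  simp [pvCids, List.filter_append, h, PySem.List.dedup, PySem.Set.ofList, List.foldl_append] at *
  simp [PySem.Set.add, h2']

theorem pvCids_prefix (m : PySem.Dict String Int) (p l : List String) :
    pvCids m p <+: pvCids m (p ++ l) := by
  induction l generalizing p with
  | nil => simp
  | cons x l ih =>
      have h1 : p ++ x :: l = (p ++ [x]) ++ l := by simp
      rw [h1]
      refine List.IsPrefix.trans ?_ (ih (p ++ [x]))
      by_cases hx : m.contains x = true
      · by_cases hmem : m.getD x 0 ∈ pvCids m p
        · rw [pvCids_append_mem m p x hx hmem]
        · rw [pvCids_append_new m p x hx hmem]; exact ⟨_, rfl⟩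
      · rw [pvCids_append_not m p x (by simpa using hx)]

theorem pvCids_nodup (m : PySem.Dict String Int) (l : List String) : (pvCids m l).Nodup :=
  PySem.List.nodup_dedup _

-- the full color table agrees with the partial one on already-seen cluster ids
theorem pv_full_agrees (m : PySem.Dict String Int) (p l : List String) (c : Int)
    (hc : c ∈ pvCids m p) :
    (pvCtc (pvCids m (p ++ l))).getD c "" = (pvCtc (pvCids m p)).getD c "" := by
  obtain ⟨t, ht⟩ := pvCids_prefix m p l
  rw [← ht]
  exact pvCtc_getD_prefix _ _ _ (ht ▸ pvCids_nodup m (p ++ l)) hc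

-- A's loop equals: loop over the present ids, coloring from the FULL color table pvCtc (pvCids m ids)
theorem pv_main (m : PySem.Dict String Int) :
    ∀ (rest p : List String) (colors : PySem.Dict String String),
    (rest.foldl (pvStepA m) (pvCtc (pvCids m p), colors)).2
    = (rest.filter (fun d => m.contains d)).foldl
        (fun c d => c.insert d ((pvCtc (pvCids m (p ++ rest))).getD (m.getD d 0) "")) colors := by
  intro rest
  induction rest with
  | nil => intro p colors; simp
  | cons d rest ih =>
      intro p colors
      have hsplit : p ++ d :: rest = (p ++ [d]) ++ rest := by simp
      by_cases hd : m.contains d = true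
      · rw [List.foldl_cons, List.filter_cons_of_pos (by simp [hd]), List.foldl_cons, hsplit]
        by_cases hmem : m.getD d 0 ∈ pvCids m p
        · have hcont : (pvCtc (pvCids m p)).contains (m.getD d 0) = true :=
            (pvCtc_contains _ _).mpr hmem
          have hval : (pvCtc (pvCids m ((p ++ [d]) ++ rest))).getD (m.getD d 0) ""
              = (pvCtc (pvCids m p)).getD (m.getD d 0) "" := by
            rw [← hsplit]; exact pv_full_agrees m p (d :: rest) _ hmem
          rw [hval]
          have hstep : pvStepA m (pvCtc (pvCids m p), colors) d
              = (pvCtc (pvCids m p), colors.insert d ((pvCtc (pvCids m p)).getD (m.getD d 0) "")) := by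
            simp [pvStepA, hd, hcont]
          rw [hstep, ← pvCids_append_mem m p d hd hmem]
          exact ih (p ++ [d]) _
        · have hcont : (pvCtc (pvCids m p)).contains (m.getD d 0) = false := by
            rw [Bool.eq_false_iff]; intro hcc; exact hmem ((pvCtc_contains _ _).mp hcc)
          have hctc' : (pvCtc (pvCids m p)).insert (m.getD d 0)
                (pvPalette.getD ((pvCtc (pvCids m p)).size % pvPalette.length) "")
              = pvCtc (pvCids m (p ++ [d])) := by
            rw [pvCids_append_new m p d hd hmem, pvCtc_append,
                pvCtc_size _ (pvCids_nodup m p)]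
            rfl
          have hnew : (pvCtc (pvCids m (p ++ [d]))).getD (m.getD d 0) ""
              = pvPal (pvCids m p).length := by
            rw [pvCids_append_new m p d hd hmem, pvCtc_append, PySem.Dict.getD_insert_self]
          have hval : (pvCtc (pvCids m ((p ++ [d]) ++ rest))).getD (m.getD d 0) ""
              = pvPal (pvCids m p).length := by
            rw [pv_full_agrees m (p ++ [d]) rest _ (by
                  rw [pvCids_append_new m p d hd hmem]; simp), hnew]
          have hstep : pvStepA m (pvCtc (pvCids m p), colors) d
              = (pvCtc (pvCids m (p ++ [d])),
                 colors.insert d (pvPal (pvCids m p).length)) := by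
            simp only [pvStepA, hd, hcont, Bool.false_eq_true, if_false]
            rw [hctc', hnew]
            simp
          rw [hval, hstep]
          exact ih (p ++ [d]) _
      · have hd' : m.contains d = false := by simpa using hd
        rw [List.foldl_cons, List.filter_cons_of_neg (by simp [hd']), hsplit]
        have hstep : pvStepA m (pvCtc (pvCids m p), colors) d = (pvCtc (pvCids m p), colors) := by
          simp [pvStepA, hd']
        rw [hstep, ← pvCids_append_not m p d hd']
        exact ih (p ++ [d]) colors

-- === B-side lemmas: the sorted ranking equals the first-appearance dedup order ===

-- named pieces of B's pipeline (proof only; each is definitionally the port's term)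
def pvFirst (m : PySem.Dict String Int) (ids : List String) : PySem.Dict Int Int :=
  (pvPairs m ids).reverse.foldl (fun d p => d.insert p.2.2 p.1) PySem.Dict.empty

def pvRanked (m : PySem.Dict String Int) (ids : List String) : List Int :=
  PySem.List.sorted (pvFirst m ids).keys (fun c => (pvFirst m ids).getD c 0) false

theorem pv_alt_eq (ids : List String) (dtc : List (String × Int)) :
    colors_for_clusters_py_alt ids dtc
      = ((pvPairs (PySem.Dict.mk dtc) ids).foldl
          (fun (colors : PySem.Dict String String) p =>
            colors.insert p.2.1
              ((pvCtc (pvRanked (PySem.Dict.mk dtc) ids)).getD p.2.2 "")) PySem.Dict.empty).items := rfl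

theorem pvPairs_map_snd (m : PySem.Dict String Int) (ids : List String) :
    (pvPairs m ids).map (fun p => p.2.1) = ids.filter (fun d => m.contains d) := by
  unfold pvPairs
  rw [List.map_map]
  conv_rhs => rw [← PySem.List.map_snd_enumerate ids 0, List.filter_map]
  rfl

theorem pvPairs_map_cid (m : PySem.Dict String Int) (ids : List String) :
    (pvPairs m ids).map (fun p => p.2.2)
      = (ids.filter (fun d => m.contains d)).map (fun d => m.getD d 0) := by
  unfold pvPairs
  rw [List.map_map]
  conv_rhs => rw [← PySem.List.map_snd_enumerate ids 0, List.filter_map, List.map_map]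
  rfl

theorem pvPairs_pairwise (m : PySem.Dict String Int) (ids : List String) :
    (pvPairs m ids).Pairwise (fun p q => p.1 < q.1) := by
  unfold pvPairs
  refine List.Pairwise.map _ (fun p q h => h) ?_
  exact List.Pairwise.sublist List.filter_sublist (PySem.List.pairwise_lt_enumerate ids 0)

theorem pvFirstIdx_cons (q : Int × String × Int) (l : List (Int × String × Int)) (c : Int) :
    pvFirstIdx (q :: l) c = if q.2.2 = c then q.1 else pvFirstIdx l c := by
  unfold pvFirstIdx
  rw [List.find?_cons]
  by_cases hc : q.2.2 = c
  · simp [hc]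
  · have hbe : (q.2.2 == c) = false := by simpa using hc
    simp only [hbe, hc, if_false]

-- the reversed overwrite loop computes the first-occurrence index
theorem pv_first_getD (l : List (Int × String × Int)) (c : Int) :
    (l.reverse.foldl (fun d p => d.insert p.2.2 p.1) PySem.Dict.empty).getD c 0
      = pvFirstIdx l c := by
  induction l with
  | nil => simp [pvFirstIdx, PySem.Dict.getD_empty]
  | cons q l ih =>
      have hr : (q :: l).reverse = l.reverse ++ [q] := by simp
      rw [hr, List.foldl_append, List.foldl_cons, List.foldl_nil, PySem.Dict.getD_insert,
          pvFirstIdx_cons]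
      by_cases hc : c = q.2.2
      · simp [hc]
      · rw [if_neg hc, if_neg (Ne.symm hc), ih]

-- the keys of `first` are the distinct cluster ids (in dedup-of-reverse order)
theorem pv_first_keys (l : List (Int × String × Int)) :
    (l.reverse.foldl (fun d p => d.insert p.2.2 p.1) PySem.Dict.empty).keys
      = PySem.List.dedup (l.reverse.map (fun p => p.2.2)) := by
  rw [PySem.Dict.keys_foldl_insert_key l.reverse (fun p => p.2.2) (fun d p => p.1)]
  simp [PySem.Set.update, PySem.Set.ofList, PySem.List.dedup, PySem.Dict.keys_empty, PySem.Set.empty]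

-- dedup append cases (over Int lists)
theorem pv_dedup_append_mem (L : List Int) (x : Int) (h : x ∈ L) :
    PySem.List.dedup (L ++ [x]) = PySem.List.dedup L := by
  have h' : x ∈ PySem.List.dedup L := (PySem.List.mem_dedup _ _).mpr h
  simp [PySem.List.dedup, PySem.Set.ofList, List.foldl_append] at *
  simp [PySem.Set.add, h']

theorem pv_dedup_append_new (L : List Int) (x : Int) (h : x ∉ L) :
    PySem.List.dedup (L ++ [x]) = PySem.List.dedup L ++ [x] := by
  have h' : x ∉ PySem.List.dedup L := fun hx => h ((PySem.List.mem_dedup _ _).mp hx)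
  simp [PySem.List.dedup, PySem.Set.ofList, List.foldl_append] at *
  simp [PySem.Set.add, h']

-- firstIdx is stable under appending a pair whose cluster already occurred
theorem pv_firstIdx_append (l : List (Int × String × Int)) (q : Int × String × Int) (c : Int)
    (hc : c ∈ l.map (fun p => p.2.2)) :
    pvFirstIdx (l ++ [q]) c = pvFirstIdx l c := by
  obtain ⟨p, hp, hpc⟩ := List.mem_map.mp hc
  have hsome : (l.find? (fun p => p.2.2 == c)).isSome := by
    rw [List.find?_isSome]
    exact ⟨p, hp, by simp [hpc]⟩
  unfold pvFirstIdx
  rw [List.find?_append]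
  obtain ⟨r, hr⟩ := Option.isSome_iff_exists.mp hsome
  simp [hr]

theorem pv_firstIdx_append_self (l : List (Int × String × Int)) (q : Int × String × Int)
    (hq : q.2.2 ∉ l.map (fun p => p.2.2)) :
    pvFirstIdx (l ++ [q]) q.2.2 = q.1 := by
  have hnone : l.find? (fun p => p.2.2 == q.2.2) = none := by
    rw [List.find?_eq_none]
    intro p hp
    simp only [beq_iff_eq]
    intro hpe
    exact hq (List.mem_map.mpr ⟨p, hp, hpe⟩)
  unfold pvFirstIdx
  rw [List.find?_append, hnone]
  simp

-- firstIdx of a member is the index of SOME pair of the list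
theorem pv_firstIdx_mem (l : List (Int × String × Int)) (c : Int)
    (hc : c ∈ l.map (fun p => p.2.2)) :
    ∃ p ∈ l, p.2.2 = c ∧ pvFirstIdx l c = p.1 := by
  obtain ⟨p, hp, hpc⟩ := List.mem_map.mp hc
  have hsome : (l.find? (fun p => p.2.2 == c)).isSome := by
    rw [List.find?_isSome]
    exact ⟨p, hp, by simp [hpc]⟩
  obtain ⟨r, hr⟩ := Option.isSome_iff_exists.mp hsome
  refine ⟨r, List.mem_of_find?_eq_some hr, ?_, ?_⟩
  · simpa using List.find?_some hr
  · unfold pvFirstIdx; rw [hr]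

-- along the dedup (first-appearance) order, firstIdx strictly increases
theorem pv_dedup_pairwise_firstIdx (l : List (Int × String × Int))
    (h : l.Pairwise (fun p q => p.1 < q.1)) :
    (PySem.List.dedup (l.map (fun p => p.2.2))).Pairwise
      (fun a b => pvFirstIdx l a < pvFirstIdx l b) := by
  induction l using List.reverseRecOn with
  | nil => simp [PySem.List.dedup, PySem.Set.ofList]
  | append_singleton l q ih =>
      have hl : l.Pairwise (fun p q => p.1 < q.1) :=
        h.sublist (List.sublist_append_left _ _)
      have hqlt : ∀ p ∈ l, p.1 < q.1 := by
        have := List.pairwise_append.mp h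
        intro p hp
        exact this.2.2 p hp q (by simp)
      have ihp := ih hl
      rw [List.map_append]
      simp only [List.map_cons, List.map_nil]
      by_cases hmem : q.2.2 ∈ l.map (fun p => p.2.2)
      · rw [pv_dedup_append_mem _ _ hmem]
        refine ihp.imp_of_mem ?_
        intro a b ha hb hab
        have ha' := (PySem.List.mem_dedup _ _).mp ha
        have hb' := (PySem.List.mem_dedup _ _).mp hb
        rw [pv_firstIdx_append l q a ha', pv_firstIdx_append l q b hb']
        exact hab
      · rw [pv_dedup_append_new _ _ hmem]
        rw [List.pairwise_append]
        refine ⟨?_, by simp, ?_⟩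
        · refine ihp.imp_of_mem ?_
          intro a b ha hb hab
          have ha' := (PySem.List.mem_dedup _ _).mp ha
          have hb' := (PySem.List.mem_dedup _ _).mp hb
          rw [pv_firstIdx_append l q a ha', pv_firstIdx_append l q b hb']
          exact hab
        · intro a ha b hb
          rw [List.mem_singleton] at hb
          subst hb
          have ha' := (PySem.List.mem_dedup _ _).mp ha
          rw [pv_firstIdx_append l q a ha', pv_firstIdx_append_self l q hmem]
          obtain ⟨p, hp, _, hpe⟩ := pv_firstIdx_mem l a ha'
          rw [hpe]
          exact hqlt p hp

theorem pvPairs_cid_eq (m : PySem.Dict String Int) (ids : List String) :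
    ∀ p ∈ pvPairs m ids, p.2.2 = m.getD p.2.1 0 := by
  intro p hp
  unfold pvPairs at hp
  obtain ⟨q, hq, rfl⟩ := List.mem_map.mp hp
  rfl

-- the sorted ranking of B equals the first-appearance dedup order of A
theorem pv_ranked_eq (m : PySem.Dict String Int) (ids : List String) :
    pvRanked m ids = pvCids m ids := by
  have hkeys := pv_first_keys (pvPairs m ids)
  have hL := pvPairs_map_cid m ids
  have hperm : (pvCids m ids).Perm (pvFirst m ids).keys := by
    rw [pvFirst, hkeys]
    refine (List.perm_ext_iff_of_nodup (pvCids_nodup m ids) (PySem.List.nodup_dedup _)).mpr ?_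
    intro a
    rw [pvCids, PySem.List.mem_dedup, PySem.List.mem_dedup, List.map_reverse, List.mem_reverse,
        hL, List.mem_map]
  have hpw : (pvCids m ids).Pairwise
      (fun a b => (pvFirst m ids).getD a 0 < (pvFirst m ids).getD b 0) := by
    have h1 := pv_dedup_pairwise_firstIdx (pvPairs m ids) (pvPairs_pairwise m ids)
    have h2 : pvCids m ids = PySem.List.dedup ((pvPairs m ids).map (fun p => p.2.2)) := by
      rw [hL]; rfl
    rw [h2]
    refine h1.imp ?_
    intro a b hab
    rw [pvFirst, pv_first_getD, pv_first_getD]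
    exact hab
  exact PySem.List.sorted_eq_of_perm_of_pairwise_lt _ _ _ hperm hpw

-- ===== VERDICT (by name: the statement is the Claim_ definition above) =====
theorem colors_for_clusters_py_spec : Claim_equal_colors_for_clusters_py := by
  intro ids dtc _
  show colors_for_clusters_py ids dtc = colors_for_clusters_py_alt ids dtc
  -- A's side: pv_main gives the filter-fold with the full color table
  have hA : colors_for_clusters_py ids dtc
      = ((ids.filter (fun d => (PySem.Dict.mk dtc).contains d)).foldl
          (fun c d => c.insert d
            ((pvCtc (pvCids (PySem.Dict.mk dtc) ids)).getD ((PySem.Dict.mk dtc).getD d 0) ""))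
          PySem.Dict.empty).items := by
    have h := pv_main (PySem.Dict.mk dtc) ids [] PySem.Dict.empty
    simp only [List.nil_append] at h
    exact congrArg PySem.Dict.items h
  rw [hA, pv_alt_eq, pv_ranked_eq]
  congr 1
  -- final pass: fold over pairs = fold over the present ids (B's cid is A's lookup)
  rw [← pvPairs_map_snd (PySem.Dict.mk dtc) ids, List.foldl_map]
  refine PySem.List.foldl_congr_mem _ _ _ _ ?_
  intro acc p hp
  rw [pvPairs_cid_eq (PySem.Dict.mk dtc) ids p hp]
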